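-- pv_equiv track=rewrite | github.com/ostinatocc/workbench | src/aionis_workbench/policies.py | _dedupe_latest_by_prefix
-- ===== SOURCE A (Python) =====
-- def _dedupe_latest_by_prefix(items: list[str], prefixes: tuple[str, ...]) -> list[str]:
--     kept: list[str] = []
--     seen_prefixes: set[str] = set()
--
--     for item in reversed(items):
--         matched_prefix = next((prefix for prefix in prefixes if item.startswith(prefix)), None)
--         if matched_prefix is None:
--             if item not in kept:
--                 kept.append(item)
--             continue
--         if matched_prefix in seen_prefixes:
--             continue
--         seen_prefixes.add(matched_prefix)
--         kept.append(item)
--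
--     kept.reverse()
--     return kept
-- ===== SOURCE B (Python) =====
-- def _dedupe_latest_by_prefix(items: list[str], prefixes: tuple[str, ...]) -> list[str]:
--     def key(item: str) -> str:
--         return next((p for p in prefixes if item.startswith(p)), item)
--
--     keys = [key(item) for item in items]
--     last_index: dict[str, int] = {}
--     for i, k in enumerate(keys):
--         last_index[k] = i
--     return [item for i, (item, k) in enumerate(zip(items, keys)) if last_index[k] == i]
-- ===== Notes on version B (the rewrite author's own statement) =====
-- stated objective: alternative
-- what changed: Replaced the reversed pass with a seen-prefix set and a linear 'item not in kept' scan by forward passes: keys (first matching prefix, else the item) computed once per item, a dict mapping each key to its last index, and a filter keeping each item exactly at its key's last index.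
import Mathlib
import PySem

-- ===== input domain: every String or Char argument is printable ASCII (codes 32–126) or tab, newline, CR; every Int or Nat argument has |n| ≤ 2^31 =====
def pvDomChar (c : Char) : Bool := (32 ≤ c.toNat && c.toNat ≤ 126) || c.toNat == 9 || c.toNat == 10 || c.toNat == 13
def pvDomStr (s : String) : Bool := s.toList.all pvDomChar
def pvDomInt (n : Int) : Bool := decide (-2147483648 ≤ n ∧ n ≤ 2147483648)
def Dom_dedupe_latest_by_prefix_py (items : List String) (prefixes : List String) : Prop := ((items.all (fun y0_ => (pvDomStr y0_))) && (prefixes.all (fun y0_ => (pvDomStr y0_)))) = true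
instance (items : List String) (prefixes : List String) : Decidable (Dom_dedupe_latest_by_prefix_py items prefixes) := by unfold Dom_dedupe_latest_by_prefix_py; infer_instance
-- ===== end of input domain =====

-- B replaces A's reversed pass (seen-prefix set + linear 'item not in kept' scan) by forward
-- passes: precomputed keys, a last-index-per-key dict, and a filter over enumerate; same value.

-- ===== PORT A =====
-- one loop iteration of A: state = (kept, seen_prefixes)
def pvStepA (prefixes : List String) (st : List String × PySem.Set String) (item : String) :
    List String × PySem.Set String :=
  match prefixes.find? (fun p => PySem.Str.startswith item p) with
  | none => if st.1.contains item then st else (st.1 ++ [item], st.2)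
  | some p => if PySem.Set.contains st.2 p then st
              else (st.1 ++ [item], PySem.Set.add st.2 p)

def dedupe_latest_by_prefix_py (items : List String) (prefixes : List String) : List String :=
  (items.reverse.foldl (pvStepA prefixes) ([], PySem.Set.empty)).1.reverse

-- ===== PORT B =====
-- key(item) = next((p for p in prefixes if item.startswith(p)), item)
def pvKey (prefixes : List String) (item : String) : String :=
  match prefixes.find? (fun p => PySem.Str.startswith item p) with
  | some p => p
  | none => item

-- 'last_index[k] == i': the key k is always present in the dict, so get? = some i is exact
def dedupe_latest_by_prefix_py_alt (items : List String) (prefixes : List String) : List String :=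
  let keys := items.map (pvKey prefixes)
  let last : PySem.Dict String Int :=
    (PySem.List.enumerate keys 0).foldl (fun d q => d.insert q.2 q.1) PySem.Dict.empty
  (PySem.List.enumerate (items.zip keys) 0).foldl
    (fun acc q => if last.get? q.2.2 == some q.1 then acc ++ [q.2.1] else acc) []

-- ===== PRECONDITION & SPEC =====
def Spec_dedupe_latest_by_prefix_py (items : List String) (prefixes : List String) (out : List String) : Prop := out = dedupe_latest_by_prefix_py_alt items prefixes
instance (items : List String) (prefixes : List String) (out : List String) : Decidable (Spec_dedupe_latest_by_prefix_py items prefixes out) := by unfold Spec_dedupe_latest_by_prefix_py; infer_instance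

-- ===== CLAIM (what is proved, stated in full; the proofs are below) =====
def Claim_equal_dedupe_latest_by_prefix_py : Prop := ∀ (items : List String) (prefixes : List String), Dom_dedupe_latest_by_prefix_py items prefixes → Spec_dedupe_latest_by_prefix_py items prefixes (dedupe_latest_by_prefix_py items prefixes)

-- ===== LEMMAS AND PROOFS =====

-- common specification both ports are reduced to: keep an item iff no later item has the same key
def pvSpecGo (prefixes : List String) : List String → List String
  | [] => []
  | x :: xs =>
      if (xs.map (pvKey prefixes)).contains (pvKey prefixes x) then pvSpecGo prefixes xs
      else x :: pvSpecGo prefixes xs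

theorem pvSw_self (x : String) : PySem.Str.startswith x x = true := by
  simp [PySem.Str.startswith_eq, PySem.Chars.startswith_iff]

theorem pvKey_matched_iff (prefixes : List String) (y p : String) (hp : p ∈ prefixes) :
    pvKey prefixes y = p ↔ prefixes.find? (fun q => PySem.Str.startswith y q) = some p := by
  unfold pvKey
  cases h : prefixes.find? (fun q => PySem.Str.startswith y q) with
  | none =>
    simp only [List.find?_eq_none] at h
    constructor
    · rintro rfl; exact absurd (pvSw_self y) (by simpa using h y hp)
    · intro hc; cases hc
  | some q => simp

theorem pvKey_unmatched_iff (prefixes : List String) (x y : String)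
    (hx : prefixes.find? (fun p => PySem.Str.startswith x p) = none) :
    pvKey prefixes y = x ↔ y = x := by
  unfold pvKey
  cases h : prefixes.find? (fun q => PySem.Str.startswith y q) with
  | none => simp
  | some q =>
    have hq : q ∈ prefixes := List.mem_of_find?_eq_some h
    simp only [List.find?_eq_none] at hx
    constructor
    · rintro rfl
      exact absurd (pvSw_self q) (by simpa using hx q hq)
    · rintro rfl
      exact absurd (List.find?_some h) (by simpa using hx q hq)

theorem pvMapKey_contains (prefixes : List String) (xs : List String) (z : String) :
    ((xs.map (pvKey prefixes)).contains z = true) ↔ ∃ y ∈ xs, pvKey prefixes y = z := by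
  simp

theorem pvA_inv (prefixes : List String) (xs : List String) :
    ((xs.reverse.foldl (pvStepA prefixes) ([], PySem.Set.empty)).1.reverse = pvSpecGo prefixes xs)
  ∧ (∀ z, prefixes.find? (fun p => PySem.Str.startswith z p) = none →
        (((xs.reverse.foldl (pvStepA prefixes) ([], PySem.Set.empty)).1.contains z = true) ↔ z ∈ xs))
  ∧ (∀ p, (PySem.Set.contains (xs.reverse.foldl (pvStepA prefixes) ([], PySem.Set.empty)).2 p = true
        ↔ ∃ y ∈ xs, prefixes.find? (fun q => PySem.Str.startswith y q) = some p)) := by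
  induction xs with
  | nil => simp [pvSpecGo, PySem.Set.empty, PySem.Set.contains]
  | cons x xs ih =>
    obtain ⟨ih1, ih2, ih3⟩ := ih
    have hfold : (x :: xs).reverse.foldl (pvStepA prefixes) ([], PySem.Set.empty)
        = pvStepA prefixes (xs.reverse.foldl (pvStepA prefixes) ([], PySem.Set.empty)) x := by
      rw [List.reverse_cons, List.foldl_append]; rfl
    set st := xs.reverse.foldl (pvStepA prefixes) ([], PySem.Set.empty) with hst
    rw [hfold]
    cases hm : prefixes.find? (fun p => PySem.Str.startswith x p) with
    | none =>
      have hkx : pvKey prefixes x = x := by unfold pvKey; rw [hm]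
      have hcond : ((xs.map (pvKey prefixes)).contains (pvKey prefixes x) = true) ↔ x ∈ xs := by
        rw [hkx, pvMapKey_contains]
        constructor
        · rintro ⟨y, hy, hky⟩; rwa [(pvKey_unmatched_iff prefixes x y hm).mp hky] at hy
        · intro hx; exact ⟨x, hx, hkx⟩
      by_cases hc : st.1.contains x = true
      · have hstep : pvStepA prefixes st x = st := by
          unfold pvStepA; rw [hm]; simp only [hc, if_true]
        rw [hstep]
        refine ⟨?_, ?_, ?_⟩
        · show st.1.reverse = pvSpecGo prefixes (x :: xs)
          rw [pvSpecGo, if_pos (hcond.mpr ((ih2 x hm).mp hc)), ih1]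
        · intro z hz
          rw [ih2 z hz, List.mem_cons]
          constructor
          · exact Or.inr
          · rintro (rfl | h)
            · exact (ih2 _ hz).mp hc
            · exact h
        · intro p
          rw [ih3 p]
          constructor
          · rintro ⟨y, hy, h⟩; exact ⟨y, List.mem_cons_of_mem _ hy, h⟩
          · rintro ⟨y, hy, h⟩
            rcases List.mem_cons.mp hy with rfl | hy'
            · rw [hm] at h; cases h
            · exact ⟨y, hy', h⟩
      · have hstep : pvStepA prefixes st x = (st.1 ++ [x], st.2) := by
          unfold pvStepA; rw [hm]; simp only [hc, if_false, Bool.false_eq_true]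
        rw [hstep]
        have hxnot : x ∉ xs := fun hx => hc ((ih2 x hm).mpr hx)
        refine ⟨?_, ?_, ?_⟩
        · show (st.1 ++ [x]).reverse = pvSpecGo prefixes (x :: xs)
          rw [pvSpecGo, if_neg (fun h => hxnot (hcond.mp h))]
          simp [ih1]
        · intro z hz
          simp only [List.contains_append, List.mem_cons]
          rw [Bool.or_eq_true, ih2 z hz]
          constructor
          · rintro (h | h)
            · exact Or.inr h
            · simp only [List.contains_cons, List.contains_nil, Bool.or_false, beq_iff_eq] at h
              exact Or.inl h
          · rintro (rfl | h)
            · simp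
            · exact Or.inl h
        · intro p
          rw [ih3 p]
          constructor
          · rintro ⟨y, hy, h⟩; exact ⟨y, List.mem_cons_of_mem _ hy, h⟩
          · rintro ⟨y, hy, h⟩
            rcases List.mem_cons.mp hy with rfl | hy'
            · rw [hm] at h; cases h
            · exact ⟨y, hy', h⟩
    | some p =>
      have hp : p ∈ prefixes := List.mem_of_find?_eq_some hm
      have hkx : pvKey prefixes x = p := by unfold pvKey; rw [hm]
      have hcond : ((xs.map (pvKey prefixes)).contains (pvKey prefixes x) = true)
          ↔ ∃ y ∈ xs, prefixes.find? (fun q => PySem.Str.startswith y q) = some p := by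
        rw [hkx, pvMapKey_contains]
        constructor
        · rintro ⟨y, hy, hky⟩; exact ⟨y, hy, (pvKey_matched_iff prefixes y p hp).mp hky⟩
        · rintro ⟨y, hy, h⟩; exact ⟨y, hy, (pvKey_matched_iff prefixes y p hp).mpr h⟩
      by_cases hc : PySem.Set.contains st.2 p = true
      · have hstep : pvStepA prefixes st x = st := by
          unfold pvStepA; rw [hm]; simp only [hc, if_true]
        rw [hstep]
        refine ⟨?_, ?_, ?_⟩
        · show st.1.reverse = pvSpecGo prefixes (x :: xs)
          rw [pvSpecGo, if_pos (hcond.mpr ((ih3 p).mp hc)), ih1]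
        · intro z hz
          have hzx : z ≠ x := by rintro rfl; rw [hm] at hz; cases hz
          rw [ih2 z hz, List.mem_cons]
          constructor
          · exact Or.inr
          · rintro (rfl | h)
            · exact absurd rfl hzx
            · exact h
        · intro p'
          rw [ih3 p']
          constructor
          · rintro ⟨y, hy, h⟩; exact ⟨y, List.mem_cons_of_mem _ hy, h⟩
          · rintro ⟨y, hy, h⟩
            rcases List.mem_cons.mp hy with rfl | hy'
            · rw [hm] at h; injection h with h'; subst h'; exact (ih3 _).mp hc
            · exact ⟨y, hy', h⟩
      · have hstep : pvStepA prefixes st x = (st.1 ++ [x], PySem.Set.add st.2 p) := by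
          unfold pvStepA; rw [hm]; simp only [hc, if_false, Bool.false_eq_true]
        rw [hstep]
        have hnot : ¬ ∃ y ∈ xs, prefixes.find? (fun q => PySem.Str.startswith y q) = some p :=
          fun h => hc ((ih3 p).mpr h)
        refine ⟨?_, ?_, ?_⟩
        · show (st.1 ++ [x]).reverse = pvSpecGo prefixes (x :: xs)
          rw [pvSpecGo, if_neg (fun h => hnot (hcond.mp h))]
          simp [ih1]
        · intro z hz
          have hzx : z ≠ x := by rintro rfl; rw [hm] at hz; cases hz
          simp only [List.contains_append, List.mem_cons]
          rw [Bool.or_eq_true, ih2 z hz]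
          constructor
          · rintro (h | h)
            · exact Or.inr h
            · simp only [List.contains_cons, List.contains_nil, Bool.or_false, beq_iff_eq] at h
              exact absurd h hzx
          · rintro (rfl | h)
            · exact absurd rfl hzx
            · exact Or.inl h
        · intro p'
          rw [PySem.Set.contains_iff, PySem.Set.mem_add, ← PySem.Set.contains_iff, ih3 p']
          constructor
          · rintro (⟨y, hy, h⟩ | rfl)
            · exact ⟨y, List.mem_cons_of_mem _ hy, h⟩
            · exact ⟨x, List.mem_cons_self, hm⟩
          · rintro ⟨y, hy, h⟩
            rcases List.mem_cons.mp hy with rfl | hy'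
            · rw [hm] at h; injection h with h'; exact Or.inr h'.symm
            · exact Or.inl ⟨y, hy', h⟩

theorem pvA_eq_spec (prefixes items : List String) :
    dedupe_latest_by_prefix_py items prefixes = pvSpecGo prefixes items := by
  unfold dedupe_latest_by_prefix_py
  exact (pvA_inv prefixes items).1

theorem pvSpec_append (prefixes : List String) (xs : List String) (x : String) :
    pvSpecGo prefixes (xs ++ [x])
      = (pvSpecGo prefixes xs).filter (fun y => !(pvKey prefixes y == pvKey prefixes x)) ++ [x] := by
  induction xs with
  | nil => simp [pvSpecGo]
  | cons y ys ih =>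
    rw [List.cons_append, pvSpecGo, pvSpecGo, ih]
    by_cases hys : ((ys.map (pvKey prefixes)).contains (pvKey prefixes y) = true)
    · rw [if_pos, if_pos hys]
      simp only [List.map_append, List.contains_append, hys, Bool.true_or]
    · by_cases hxy : pvKey prefixes y = pvKey prefixes x
      · rw [if_pos, if_neg hys]
        · simp [hxy]
        · simp only [List.map_append, List.contains_append, Bool.or_eq_true]
          right; simp [hxy]
      · rw [if_neg, if_neg hys]
        · simp only [List.filter_cons]
          have : (!(pvKey prefixes y == pvKey prefixes x)) = true := by simp [hxy]
          rw [this]; simp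
        · simp only [List.map_append, List.contains_append, Bool.or_eq_true]
          rintro (h | h)
          · exact hys h
          · simp only [List.map_cons, List.map_nil, List.contains_cons, List.contains_nil,
              Bool.or_false, beq_iff_eq] at h
            exact hxy h

theorem pvB_filter_eq_spec (prefixes : List String) (items : List String) :
    ((PySem.List.enumerate items 0).filter
        (fun q => ((PySem.List.enumerate items 0).foldl
            (fun d q => d.insert (pvKey prefixes q.2) q.1) PySem.Dict.empty).get?
            (pvKey prefixes q.2) == some q.1)).map (·.2)
      = pvSpecGo prefixes items := by
  induction items using List.reverseRecOn with
  | nil => simp [pvSpecGo, PySem.List.enumerate]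
  | append_singleton xs x ih =>
    have henum : PySem.List.enumerate (xs ++ [x]) 0
        = PySem.List.enumerate xs 0 ++ [((xs.length : Int), x)] := by
      rw [PySem.List.enumerate_append]
      norm_num [PySem.List.enumerate]
    set d := (PySem.List.enumerate xs 0).foldl
        (fun d q => d.insert (pvKey prefixes q.2) q.1) PySem.Dict.empty with hd
    have hdict : (PySem.List.enumerate (xs ++ [x]) 0).foldl
        (fun d q => d.insert (pvKey prefixes q.2) q.1) PySem.Dict.empty
        = d.insert (pvKey prefixes x) (xs.length : Int) := by
      rw [henum, List.foldl_append]; rfl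
    rw [hdict, henum, List.filter_append, List.map_append]
    have hlast : (List.filter (fun q => (d.insert (pvKey prefixes x) (xs.length : Int)).get?
        (pvKey prefixes q.2) == some q.1) [((xs.length : Int), x)]).map (·.2) = [x] := by
      simp [PySem.Dict.get?_insert_self]
    rw [hlast]
    have hcongr : List.filter (fun q => (d.insert (pvKey prefixes x) (xs.length : Int)).get?
          (pvKey prefixes q.2) == some q.1) (PySem.List.enumerate xs 0)
        = List.filter (fun q => (d.get? (pvKey prefixes q.2) == some q.1)
            && !(pvKey prefixes q.2 == pvKey prefixes x)) (PySem.List.enumerate xs 0) := by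
      apply List.filter_congr
      intro q hq
      rcases (PySem.List.mem_enumerate_iff xs 0 q).mp hq with ⟨k, hk, rfl⟩
      by_cases hkey : pvKey prefixes xs[k] = pvKey prefixes x
      · rw [hkey, PySem.Dict.get?_insert_self]
        simp
        omega
      · rw [PySem.Dict.get?_insert_of_ne _ _ hkey]
        simp [hkey]
    rw [hcongr]
    have hsplit : (List.filter (fun q => (d.get? (pvKey prefixes q.2) == some q.1)
          && !(pvKey prefixes q.2 == pvKey prefixes x)) (PySem.List.enumerate xs 0)).map (·.2)
        = ((List.filter (fun q => d.get? (pvKey prefixes q.2) == some q.1)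
            (PySem.List.enumerate xs 0)).map (·.2)).filter
            (fun y => !(pvKey prefixes y == pvKey prefixes x)) := by
      simp only [List.filter_map, List.filter_filter, Function.comp]
      congr 1
      apply List.filter_congr
      intro q _
      rw [Bool.and_comm]
    rw [hsplit, ih, ← pvSpec_append]

theorem pvEnumerate_map {α β : Type} (f : α → β) (xs : List α) (s : Int) :
    PySem.List.enumerate (xs.map f) s = (PySem.List.enumerate xs s).map (fun q => (q.1, f q.2)) := by
  induction xs generalizing s with
  | nil => simp [PySem.List.enumerate]
  | cons x xs ih => simp [PySem.List.enumerate_cons, ih]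

theorem pvZip_map_self {α β : Type} (f : α → β) (xs : List α) :
    xs.zip (xs.map f) = xs.map (fun x => (x, f x)) := by
  induction xs with
  | nil => rfl
  | cons x xs ih => simp [ih]

theorem pvB_eq_spec (prefixes items : List String) :
    dedupe_latest_by_prefix_py_alt items prefixes = pvSpecGo prefixes items := by
  unfold dedupe_latest_by_prefix_py_alt
  simp only [pvZip_map_self, pvEnumerate_map, List.foldl_map]
  simp only [PySem.List.foldl_append_if]
  simpa using pvB_filter_eq_spec prefixes items

-- ===== VERDICT (by name: the statement is the Claim_ definition above) =====
theorem dedupe_latest_by_prefix_py_spec : Claim_equal_dedupe_latest_by_prefix_py := by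
  intro items prefixes _
  show _ = _
  rw [pvA_eq_spec, pvB_eq_spec]
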